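-- pv_equiv track=rewrite | github.com/exis-io/Exis | ios/swiftRiffle/cumin_generator.py | binaryMask
-- ===== SOURCE A (Python) =====
-- def binaryMask(source, normalFmt, maskedFmt, tailfmt):
--     ret = []
--
--     for i in range(2 ** len(source)):
--         generics, tail = [], []
--
--         for x, y in zip(list(('{0:0%sb}' % len(source)).format(i)), source):
--             if x is '0':
--                 generics.append(normalFmt % y)
--             else:
--                 generics.append(maskedFmt % y)
--                 tail.append(tailfmt % y)
--
--         ret.append((generics, tail))
--
--     return ret
-- ===== SOURCE B (Python) =====
-- def binaryMask(source, normalFmt, maskedFmt, tailfmt):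
--     # Recursive subset enumeration: at each element branch into the
--     # 'normal' case first, then the 'masked' case (= MSB-first bit order of A).
--     def go(xs, generics, tail):
--         if not xs:
--             return [(generics, tail)]
--         y = xs[0]
--         rest = xs[1:]
--         return (go(rest, generics + [normalFmt % y], tail)
--                 + go(rest, generics + [maskedFmt % y], tail + [tailfmt % y]))
--     return go(list(source), [], [])
-- ===== Notes on version B (the rewrite author's own statement) =====
-- stated objective: alternative
-- what changed: Replaces A's enumeration of integers 0..2^n-1 with per-integer binary-string formatting and an inner zip loop by a direct recursive subset enumeration over source that branches normal-first then masked at each element, accumulating the generics/tail lists.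
import Mathlib
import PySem

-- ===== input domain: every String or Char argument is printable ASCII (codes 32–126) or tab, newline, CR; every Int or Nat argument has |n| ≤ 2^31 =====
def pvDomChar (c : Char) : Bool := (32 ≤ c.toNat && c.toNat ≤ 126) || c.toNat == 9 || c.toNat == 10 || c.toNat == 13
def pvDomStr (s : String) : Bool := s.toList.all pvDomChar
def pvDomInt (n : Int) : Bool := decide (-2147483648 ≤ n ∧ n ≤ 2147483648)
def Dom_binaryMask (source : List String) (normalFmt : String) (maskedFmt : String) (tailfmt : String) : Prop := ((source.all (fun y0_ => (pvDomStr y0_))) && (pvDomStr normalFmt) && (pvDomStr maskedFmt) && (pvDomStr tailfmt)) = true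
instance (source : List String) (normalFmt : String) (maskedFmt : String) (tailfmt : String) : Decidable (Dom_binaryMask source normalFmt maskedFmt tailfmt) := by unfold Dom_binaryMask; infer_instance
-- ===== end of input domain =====

-- B replaces A's integer counter + binary-string formatting + inner zip loop by a direct
-- recursive subset enumeration over `source` (normal branch first, then masked); objective:
-- alternative decomposition. Equal on Pre_ (exactly the inputs where Python A returns).

-- ===== PORT A =====
-- Shared rendering leaves: Python's `%`-rendering of ONE conversion spec applied to a
-- string argument; exact for conversion types s/r/a/c on the ASCII domain (r/a = repr,
-- which on that domain quotes and escapes \\ \t \n \r and the quote character).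
def reprQuote (y : List Char) : Char :=
  if y.contains '\'' && !(y.contains '"') then '"' else '\''

def pyEsc (q c : Char) : List Char :=
  if c = '\\' then ['\\', '\\']
  else if c = '\t' then ['\\', 't']
  else if c = '\n' then ['\\', 'n']
  else if c = '\r' then ['\\', 'r']
  else if c = q then ['\\', q]
  else [c]

def pyRepr (y : List Char) : List Char :=
  reprQuote y :: (y.flatMap (pyEsc (reprQuote y)) ++ [reprQuote y])

def pyIsConv (c : Char) : Bool := c = 's' || c = 'r' || c = 'a' || c = 'c'

-- render one '%[flags][width][.prec]<conv>' spec on string argument y ('%c' accepts a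
-- 1-character string and ignores precision; '0 # +' flags are no-ops for these types)
def pyFmtA (conv : Char) (y : List Char) (minus : Bool) (width : Nat) (prec : Option Nat) : List Char :=
  let base := if conv = 'r' || conv = 'a' then pyRepr y else y
  let t := if conv = 'c' then base else match prec with | some p => base.take p | none => base
  if minus then t ++ List.replicate (width - t.length) ' '
  else List.replicate (width - t.length) ' ' ++ t

-- A-side streaming model of Python's `fmt % y`: hand-rolled scanners for the
-- flags / width / precision parts, rendering each conversion as it is met.
def pyFlagSpan : List Char → Bool × List Char
  | c :: rest =>
      if c = '#' ∨ c = '0' ∨ c = '-' ∨ c = ' ' ∨ c = '+' then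
        let mr := pyFlagSpan rest
        (mr.1 || decide (c = '-'), mr.2)
      else (false, c :: rest)
  | [] => (false, [])

def pyDigitSpan (acc : Nat) : List Char → Nat × List Char
  | c :: rest =>
      if c.isDigit then pyDigitSpan (acc * 10 + (c.toNat - 48)) rest
      else (acc, c :: rest)
  | [] => (acc, [])

def pyPrecSpan : List Char → Option Nat × List Char
  | c :: rest =>
      if c = '.' then (some (pyDigitSpan 0 rest).1, (pyDigitSpan 0 rest).2)
      else (none, c :: rest)
  | [] => (none, [])

-- parse one conversion spec (after the '%'): (left-justify?, width, precision, type, rest)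
def pyConvParse (cs : List Char) : Option (Bool × Nat × Option Nat × Char × List Char) :=
  match (pyPrecSpan (pyDigitSpan 0 (pyFlagSpan cs).2).2).2 with
  | c :: rest =>
      if pyIsConv c then
        some ((pyFlagSpan cs).1, (pyDigitSpan 0 (pyFlagSpan cs).2).1,
          (pyPrecSpan (pyDigitSpan 0 (pyFlagSpan cs).2).2).1, c, rest)
      else none
  | [] => none

-- structural recursion on a length counter (it equals the list length, so it never runs
-- out; well-founded recursion would not reduce under `decide`)
def pyModCharsAux (y : List Char) : Nat → List Char → List Char
  | _, [] => []
  | 0, cs => cs   -- unreachable: the counter starts at the length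
  | f + 1, '%' :: '%' :: rest => '%' :: pyModCharsAux y f rest
  | f + 1, '%' :: rest =>
      match pyConvParse rest with
      | some (minus, width, prec, conv, rest') =>
          pyFmtA conv y minus width prec ++ pyModCharsAux y f rest'
      | none => '%' :: pyModCharsAux y f rest   -- unreachable under Pre_ (invalid conversion)
  | f + 1, c :: rest => c :: pyModCharsAux y f rest

def pyModChars (y cs : List Char) : List Char := pyModCharsAux y cs.length cs

def pyMod (fmt y : String) : String := String.ofList (pyModChars y.toList fmt.toList)

-- body of A's inner `for x, y in zip(...)` loop
def maskStep (normalFmt maskedFmt tailfmt : String) (gt : List String × List String)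
    (xy : Char × String) : List String × List String :=
  if xy.1 = '0' then (gt.1 ++ [pyMod normalFmt xy.2], gt.2)
  else (gt.1 ++ [pyMod maskedFmt xy.2], gt.2 ++ [pyMod tailfmt xy.2])

-- one iteration of A's outer loop: `('{0:0%sb}' % len(source)).format(i)` = the binary
-- digits of i left-zero-padded to len(source), zipped with source and folded
def rowA (normalFmt maskedFmt tailfmt : String) (source : List String) (i : Nat) :
    List String × List String :=
  ((PySem.Chars.zfill (PySem.Int.toBinChars (Int.ofNat i)) (PySem.List.len source)).zip
      source).foldl (maskStep normalFmt maskedFmt tailfmt) ([], [])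

def binaryMask (source : List String) (normalFmt : String) (maskedFmt : String) (tailfmt : String) : List (List String × List String) :=
  List.foldl (fun ret i => ret ++ [rowA normalFmt maskedFmt tailfmt source i]) []
    (List.range (2 ^ source.length))

-- ===== PORT B =====
-- B-side model of Python's `fmt % y`: tokenize the whole format string once into pieces
-- (literal characters and parsed conversion specs, via library span/dropWhile and a fold
-- for the numbers), then render the piece list by one flatMap.
inductive PieceB
  | lit : Char → PieceB
  | spec : Bool → Nat → Option Nat → Char → PieceB
deriving DecidableEq, Repr

def isFlagB (c : Char) : Bool := c == '#' || c == '0' || c == '-' || c == ' ' || c == '+'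

def natOfB (ds : List Char) : Nat := ds.foldl (fun a c => a * 10 + (c.toNat - 48)) 0

def parseSpecB : List Char → Option (PieceB × List Char)
  | [] => none
  | c0 :: cs0 =>
      if c0 = '%' then some (PieceB.lit '%', cs0)
      else
        let fl := (c0 :: cs0).takeWhile isFlagB
        let r1 := (c0 :: cs0).dropWhile isFlagB
        let wd := r1.takeWhile Char.isDigit
        match r1.dropWhile Char.isDigit with
        | [] => none
        | d :: r2 =>
            if d = '.' then
              match r2.dropWhile Char.isDigit with
              | [] => none
              | c :: more =>
                  if pyIsConv c then
                    some (PieceB.spec (fl.contains '-') (natOfB wd)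
                      (some (natOfB (r2.takeWhile Char.isDigit))) c, more)
                  else none
            else if pyIsConv d then
              some (PieceB.spec (fl.contains '-') (natOfB wd) none d, r2)
            else none

def tokGoB : Nat → List Char → Option (List PieceB)
  | _, [] => some []
  | 0, _ :: _ => none
  | k + 1, '%' :: rest =>
      match parseSpecB rest with
      | some (p, more) => (tokGoB k more).map (p :: ·)
      | none => none
  | k + 1, c :: rest => (tokGoB k rest).map (PieceB.lit c :: ·)

def renderB (y : List Char) : PieceB → List Char
  | PieceB.lit c => [c]
  | PieceB.spec minus w prec conv => pyFmtA conv y minus w prec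

def pyModB (y cs : List Char) : List Char :=
  match tokGoB cs.length cs with
  | some ps => ps.flatMap (renderB y)
  | none => cs   -- unreachable under Pre_ (the format tokenizes there)

def pyModAltS (fmt yv : String) : String := String.ofList (pyModB yv.toList fmt.toList)

def goAlt (normalFmt maskedFmt tailfmt : String) :
    List String → List String → List String → List (List String × List String)
  | [], generics, tail => [(generics, tail)]
  | y :: rest, generics, tail =>
      goAlt normalFmt maskedFmt tailfmt rest (generics ++ [pyModAltS normalFmt y]) tail
        ++ goAlt normalFmt maskedFmt tailfmt rest (generics ++ [pyModAltS maskedFmt y])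
            (tail ++ [pyModAltS tailfmt y])

def binaryMask_alt (source : List String) (normalFmt : String) (maskedFmt : String) (tailfmt : String) : List (List String × List String) :=
  goAlt normalFmt maskedFmt tailfmt source [] []

-- ===== PRECONDITION & SPEC =====
-- Pre_'s own scanner (independent of both ports' recursions): skip one conversion spec
-- and return its type letter, then list the letters of all argument-consuming conversions.
def cSkipConv (cs : List Char) : Option (Char × List Char) :=
  match (cs.dropWhile isFlagB).dropWhile Char.isDigit with
  | [] => none
  | d :: r2 =>
      if d = '.' then
        match r2.dropWhile Char.isDigit with
        | [] => none
        | c :: rest => if pyIsConv c then some (c, rest) else none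
      else if pyIsConv d then some (d, r2) else none

def convLettersAux : Nat → List Char → Option (List Char)
  | _, [] => some []
  | 0, _ :: _ => none
  | k + 1, '%' :: '%' :: rest => convLettersAux k rest
  | k + 1, '%' :: rest =>
      match cSkipConv rest with
      | some (c, rest') => (convLettersAux k rest').map (c :: ·)
      | none => none
  | k + 1, _ :: rest => convLettersAux k rest

def convLetters (cs : List Char) : Option (List Char) := convLettersAux cs.length cs

def fmtOkB (source : List String) (f : String) : Bool :=
  match convLetters f.toList with
  | some [c] => !(c == 'c') || source.all (fun y => y.length == 1)
  | _ => false

-- Pre_ admits exactly the inputs on which Python A RETURNS: an empty source (the formats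
-- are never applied), or each of the three format strings containing exactly one
-- conversion, of string type s/r/a/c (and, if any is %c, only 1-character source
-- elements); on every other input A raises TypeError or ValueError from `fmt % y`.
def Pre_binaryMask (source : List String) (normalFmt : String) (maskedFmt : String) (tailfmt : String) : Prop :=
  source = [] ∨
    (fmtOkB source normalFmt && fmtOkB source maskedFmt && fmtOkB source tailfmt) = true
instance (source : List String) (normalFmt : String) (maskedFmt : String) (tailfmt : String) : Decidable (Pre_binaryMask source normalFmt maskedFmt tailfmt) := by unfold Pre_binaryMask; infer_instance

def pvWitness_binaryMask : List String × String × String × String :=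
  (["a", "b"], "%s", "I<%r>", "t %s")

def Spec_binaryMask (source : List String) (normalFmt : String) (maskedFmt : String) (tailfmt : String) (out : List (List String × List String)) : Prop := out = binaryMask_alt source normalFmt maskedFmt tailfmt
instance (source : List String) (normalFmt : String) (maskedFmt : String) (tailfmt : String) (out : List (List String × List String)) : Decidable (Spec_binaryMask source normalFmt maskedFmt tailfmt out) := by unfold Spec_binaryMask; infer_instance

-- ===== CLAIM (what is proved, stated in full; the proofs are below) =====
def Claim_equal_binaryMask : Prop := ∀ (source : List String) (normalFmt : String) (maskedFmt : String) (tailfmt : String), Dom_binaryMask source normalFmt maskedFmt tailfmt → Pre_binaryMask source normalFmt maskedFmt tailfmt → Spec_binaryMask source normalFmt maskedFmt tailfmt (binaryMask source normalFmt maskedFmt tailfmt)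

-- ===== LEMMAS AND PROOFS =====

-- ---- the two `%` models agree on formats Pre_'s scanner accepts ----

lemma flagSpan_eq (cs : List Char) :
    pyFlagSpan cs = ((cs.takeWhile isFlagB).contains '-', cs.dropWhile isFlagB) := by
  induction cs with
  | nil => simp [pyFlagSpan]
  | cons c rest ih =>
    by_cases h : c = '#' ∨ c = '0' ∨ c = '-' ∨ c = ' ' ∨ c = '+'
    · have hb : isFlagB c = true := by
        rcases h with h | h | h | h | h <;> subst h <;> decide
      simp [pyFlagSpan, h, ih, hb, Bool.or_comm, eq_comm]
    · have hb : isFlagB c = false := by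
        simp only [isFlagB, Bool.or_eq_false_iff, beq_eq_false_iff_ne, ne_eq]
        tauto
      simp [pyFlagSpan, h, hb]

lemma digitSpan_eq (cs : List Char) : ∀ acc : Nat,
    pyDigitSpan acc cs
      = ((cs.takeWhile Char.isDigit).foldl (fun a c => a * 10 + (c.toNat - 48)) acc,
          cs.dropWhile Char.isDigit) := by
  induction cs with
  | nil => intro acc; simp [pyDigitSpan]
  | cons c rest ih =>
    intro acc
    by_cases h : c.isDigit
    · simp [pyDigitSpan, h, ih, List.takeWhile_cons, List.dropWhile_cons]
    · simp [pyDigitSpan, h, List.takeWhile_cons, List.dropWhile_cons]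

-- B's spec parser on a non-'%'-leading string computes exactly A's pyConvParse
lemma parseSpecB_conv (cs : List Char) (hne : ∀ r, cs ≠ '%' :: r) :
    parseSpecB cs
      = match pyConvParse cs with
        | some (m, w, p, c, r) => some (PieceB.spec m w p c, r)
        | none => none := by
  cases cs with
  | nil => rfl
  | cons c0 cs0 =>
    have hc0 : ¬ c0 = '%' := fun h => hne cs0 (by rw [h])
    simp only [parseSpecB, if_neg hc0]
    unfold pyConvParse
    rw [flagSpan_eq]
    simp only [digitSpan_eq]
    cases hd : List.dropWhile Char.isDigit (List.dropWhile isFlagB (c0 :: cs0)) with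
    | nil => simp [pyPrecSpan]
    | cons d r2 =>
      by_cases hdot : d = '.'
      · subst hdot
        simp only [pyPrecSpan, if_pos rfl, digitSpan_eq]
        cases he : List.dropWhile Char.isDigit r2 with
        | nil => simp
        | cons e es => by_cases hconv : pyIsConv e <;> simp [hconv, natOfB]
      · simp only [pyPrecSpan, if_neg hdot]
        by_cases hconv : pyIsConv d <;> simp [hconv, natOfB]

-- Pre_'s spec skipper succeeds exactly with A's parser (same letter, same rest)
lemma cSkipConv_eq (cs : List Char) :
    cSkipConv cs
      = match pyConvParse cs with
        | some (_, _, _, c, r) => some (c, r)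
        | none => none := by
  unfold cSkipConv pyConvParse
  rw [flagSpan_eq]
  simp only [digitSpan_eq]
  cases hd : List.dropWhile Char.isDigit (List.dropWhile isFlagB cs) with
  | nil => simp [pyPrecSpan]
  | cons d r2 =>
    by_cases hdot : d = '.'
    · subst hdot
      simp only [pyPrecSpan, if_pos rfl, digitSpan_eq]
      cases he : List.dropWhile Char.isDigit r2 with
      | nil => simp
      | cons e es => by_cases hconv : pyIsConv e <;> simp [hconv]
    · simp only [pyPrecSpan, if_neg hdot]
      by_cases hconv : pyIsConv d <;> simp [hconv]

lemma pyConvParse_len (cs : List Char) (m : Bool) (w : Nat) (p : Option Nat) (c : Char)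
    (r : List Char) (h : pyConvParse cs = some (m, w, p, c, r)) : r.length < cs.length + 1 := by
  unfold pyConvParse at h
  rw [flagSpan_eq] at h
  simp only [digitSpan_eq] at h
  have hL1 : (List.dropWhile Char.isDigit (List.dropWhile isFlagB cs)).length ≤ cs.length :=
    le_trans (List.length_dropWhile_le _ _) (List.length_dropWhile_le _ _)
  cases hd : List.dropWhile Char.isDigit (List.dropWhile isFlagB cs) with
  | nil => rw [hd] at h; simp [pyPrecSpan] at h
  | cons d r2 =>
    rw [hd] at h
    rw [hd] at hL1
    by_cases hdot : d = '.'
    · subst hdot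
      simp only [pyPrecSpan, if_pos rfl, digitSpan_eq] at h
      have hr2 : (List.dropWhile Char.isDigit r2).length ≤ r2.length :=
        List.length_dropWhile_le _ _
      cases he : List.dropWhile Char.isDigit r2 with
      | nil => rw [he] at h; simp at h
      | cons e es =>
        rw [he] at h
        rw [he] at hr2
        by_cases hconv : pyIsConv e
        · simp [hconv] at h
          obtain ⟨_, _, _, _, hr⟩ := h
          subst hr
          simp at hr2 hL1 ⊢
          omega
        · simp [hconv] at h
    · simp only [pyPrecSpan, if_neg hdot] at h
      by_cases hconv : pyIsConv d
      · simp [hconv] at h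
        obtain ⟨_, _, _, _, hr⟩ := h
        subst hr
        simp at hL1
        omega
      · simp [hconv] at h

-- the streaming A-formatter renders exactly B's token list
lemma tokMod (y : List Char) : ∀ (k : Nat) (cs : List Char), cs.length ≤ k →
    ∀ ps, tokGoB k cs = some ps → pyModCharsAux y k cs = ps.flatMap (renderB y) := by
  intro k
  induction k with
  | zero =>
    intro cs hlen ps h
    have hnil : cs = [] := List.eq_nil_of_length_eq_zero (by omega)
    subst hnil
    simp only [tokGoB, Option.some.injEq] at h
    subst h
    simp [pyModCharsAux]
  | succ k ih =>
    intro cs hlen ps h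
    cases cs with
    | nil =>
      simp only [tokGoB, Option.some.injEq] at h
      subst h
      simp [pyModCharsAux]
    | cons c rest =>
      by_cases hc : c = '%'
      · subst hc
        cases rest with
        | nil => simp [tokGoB, parseSpecB] at h
        | cons d ds =>
          by_cases hd : d = '%'
          · subst hd
            simp only [tokGoB, parseSpecB, if_pos] at h
            obtain ⟨ps', hps', rfl⟩ := Option.map_eq_some_iff.mp h
            have hds : ds.length ≤ k := by simp at hlen; omega
            rw [show pyModCharsAux y (k + 1) ('%' :: '%' :: ds)
                  = '%' :: pyModCharsAux y k ds from rfl,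
              ih ds hds ps' hps']
            simp [renderB]
          · have hnepct : ∀ r, (d :: ds) ≠ '%' :: r := by
              intro r hcontr
              injection hcontr with h1 _
              exact hd h1
            simp only [tokGoB] at h
            rw [parseSpecB_conv (d :: ds) hnepct] at h
            cases hp : pyConvParse (d :: ds) with
            | none => rw [hp] at h; simp at h
            | some t =>
              obtain ⟨m, w, p, cv, r⟩ := t
              rw [hp] at h
              simp only at h
              obtain ⟨ps', hps', rfl⟩ := Option.map_eq_some_iff.mp h
              have hr : r.length ≤ k := by
                have := pyConvParse_len (d :: ds) m w p cv r hp
                simp at hlen this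
                omega
              have hred : pyModCharsAux y (k + 1) ('%' :: d :: ds)
                  = pyFmtA cv y m w p ++ pyModCharsAux y k r := by
                simp only [pyModCharsAux, hp]
              rw [hred, ih r hr ps' hps']
              simp [renderB]
      · have htok : tokGoB (k + 1) (c :: rest) = (tokGoB k rest).map (PieceB.lit c :: ·) := by
          simp [tokGoB]
        rw [htok] at h
        obtain ⟨ps', hps', rfl⟩ := Option.map_eq_some_iff.mp h
        have hrest : rest.length ≤ k := by simp at hlen; omega
        have hmod : pyModCharsAux y (k + 1) (c :: rest) = c :: pyModCharsAux y k rest := by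
          rw [pyModCharsAux.eq_def]
          split <;> simp_all
        rw [hmod, ih rest hrest ps' hps']
        simp [renderB]

-- a format Pre_'s scanner accepts tokenizes
lemma tokSome : ∀ (k : Nat) (cs : List Char), cs.length ≤ k →
    ∀ ls, convLettersAux k cs = some ls → (tokGoB k cs).isSome := by
  intro k
  induction k with
  | zero =>
    intro cs hlen ls _h
    have hnil : cs = [] := List.eq_nil_of_length_eq_zero (by omega)
    subst hnil
    simp [tokGoB]
  | succ k ih =>
    intro cs hlen ls h
    cases cs with
    | nil => simp [tokGoB]
    | cons c rest =>
      by_cases hc : c = '%'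
      · subst hc
        cases rest with
        | nil => simp [convLettersAux, cSkipConv] at h
        | cons d ds =>
          by_cases hd : d = '%'
          · subst hd
            simp only [convLettersAux] at h
            have hds : ds.length ≤ k := by simp at hlen; omega
            have hrec := ih ds hds ls h
            have htok : tokGoB (k + 1) ('%' :: '%' :: ds)
                = (tokGoB k ds).map (PieceB.lit '%' :: ·) := by
              simp [tokGoB, parseSpecB]
            rw [htok]
            simpa using hrec
          · have hnepct : ∀ r, (d :: ds) ≠ '%' :: r := by
              intro r hcontr
              injection hcontr with h1 _
              exact hd h1
            simp only [convLettersAux] at h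
            rw [cSkipConv_eq (d :: ds)] at h
            cases hp : pyConvParse (d :: ds) with
            | none => rw [hp] at h; simp at h
            | some t =>
              obtain ⟨m, w, p, cv, r⟩ := t
              rw [hp] at h
              simp only at h
              obtain ⟨ls', hls', rfl⟩ := Option.map_eq_some_iff.mp h
              have hr : r.length ≤ k := by
                have := pyConvParse_len (d :: ds) m w p cv r hp
                simp at hlen this
                omega
              have hrec := ih r hr ls' hls'
              have htok : tokGoB (k + 1) ('%' :: d :: ds)
                  = (tokGoB k r).map (PieceB.spec m w p cv :: ·) := by
                simp only [tokGoB]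
                rw [parseSpecB_conv (d :: ds) hnepct, hp]
              rw [htok]
              simpa using hrec
      · have hcl : convLettersAux (k + 1) (c :: rest) = convLettersAux k rest := by
          rw [convLettersAux.eq_def]
          split <;> simp_all
        rw [hcl] at h
        have hrest : rest.length ≤ k := by simp at hlen; omega
        have hrec := ih rest hrest ls h
        have htok : tokGoB (k + 1) (c :: rest) = (tokGoB k rest).map (PieceB.lit c :: ·) := by
          simp [tokGoB]
        rw [htok]
        simpa using hrec

lemma pyMod_eq_alt (f y : String) (h : (convLetters f.toList).isSome) :
    pyModAltS f y = pyMod f y := by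
  unfold pyModAltS pyMod pyModB pyModChars
  obtain ⟨ls, hls⟩ := Option.isSome_iff_exists.mp h
  have hsome := tokSome f.toList.length f.toList le_rfl ls hls
  obtain ⟨ps, hps⟩ := Option.isSome_iff_exists.mp hsome
  rw [hps, tokMod y.toList f.toList.length f.toList le_rfl ps hps]

-- ---- A-side characterisation (binary counting = subset enumeration) ----

-- `myBin n` = the binary digits of n, the list Nat.toDigits 2 computes (counter removed)
def myBin (n : Nat) : List Char :=
  if _h : n < 2 then [Nat.digitChar n]
  else myBin (n / 2) ++ [Nat.digitChar (n % 2)]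
decreasing_by exact Nat.div_lt_self (by omega) (by omega)

lemma toDigitsCore_eq_myBin (fl : Nat) :
    ∀ (n : Nat) (acc : List Char), n < fl →
      Nat.toDigitsCore 2 fl n acc = myBin n ++ acc := by
  induction fl with
  | zero => intro n acc h; omega
  | succ f ih =>
    intro n acc h
    rw [Nat.toDigitsCore, myBin]
    by_cases h2 : n < 2
    · have hd : n / 2 = 0 := by omega
      simp [hd, h2, Nat.mod_eq_of_lt h2]
    · have hd : ¬ n / 2 = 0 := by omega
      simp only [hd, if_false, dif_neg h2]
      rw [ih (n / 2) _ (by omega)]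
      simp

lemma digitChar_bin (r : Nat) (hr : r < 2) :
    Nat.digitChar r = '0' ∨ Nat.digitChar r = '1' := by
  interval_cases r <;> decide

lemma toBinChars_ofNat (i : Nat) : PySem.Int.toBinChars (Int.ofNat i) = myBin i := by
  simp only [PySem.Int.toBinChars]
  rw [if_neg (by simp)]
  have ht : (Int.ofNat i).toNat = i := rfl
  rw [ht, Nat.toDigits, toDigitsCore_eq_myBin (i + 1) i [] (by omega)]
  simp

lemma myBin_ne_nil (n : Nat) : myBin n ≠ [] := by
  rw [myBin]
  split
  · simp
  · intro h
    exact absurd (List.append_eq_nil_iff.mp h).2 (by simp)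

lemma myBin_bin (n : Nat) : ∀ c ∈ myBin n, c = '0' ∨ c = '1' := by
  induction n using Nat.strong_induction_on with
  | _ n ih =>
    rw [myBin]
    split
    · rename_i h
      intro c hc
      simp at hc
      subst hc
      exact digitChar_bin n h
    · rename_i h
      intro c hc
      rcases List.mem_append.mp hc with h1 | h1
      · exact ih (n / 2) (Nat.div_lt_self (by omega) (by omega)) c h1
      · have : n % 2 = 0 ∨ n % 2 = 1 := Nat.mod_two_eq_zero_or_one n
        rcases this with h2 | h2 <;> rw [h2] at h1 <;> simp at h1 <;> subst h1 <;> decide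

lemma myBin_length_le (n : Nat) : ∀ k : Nat, 1 ≤ k → n < 2 ^ k → (myBin n).length ≤ k := by
  induction n using Nat.strong_induction_on with
  | _ n ih =>
    intro k hk hn
    rw [myBin]
    split
    · simpa using hk
    · rename_i h
      have hk2 : 2 ≤ k := by
        by_contra hc
        have : k = 1 := by omega
        subst this; simp at hn; omega
      have hpow : 2 ^ k = 2 * 2 ^ (k - 1) := by
        rw [← pow_succ']
        congr 1; omega
      have hdiv : n / 2 < 2 ^ (k - 1) := by omega
      have := ih (n / 2) (Nat.div_lt_self (by omega) (by omega)) (k - 1) (by omega) hdiv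
      simp only [List.length_append, List.length_singleton]
      omega

lemma zfill_bin (cs : List Char) (k : Nat) (hne : cs ≠ [])
    (hbin : ∀ c ∈ cs, c = '0' ∨ c = '1') :
    PySem.Chars.zfill cs (k : Int) = List.replicate (k - cs.length) '0' ++ cs := by
  unfold PySem.Chars.zfill
  by_cases h : (k : Int) ≤ (cs.length : Int)
  · rw [if_pos h]
    have : k - cs.length = 0 := by omega
    simp [this]
  · rw [if_neg h]
    cases cs with
    | nil => exact absurd rfl hne
    | cons c rest =>
      have hc : c = '0' ∨ c = '1' := hbin c (by simp)
      have hsign : ¬ (c = '+' ∨ c = '-') := by rcases hc with h' | h' <;> subst h' <;> decide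
      simp only [hsign, if_false]
      have : ((k : Int)).toNat = k := by omega
      rw [this]

lemma myBin_two_mul_add (q r : Nat) (hq : 1 ≤ q) (hr : r < 2) :
    myBin (2 * q + r) = myBin q ++ [Nat.digitChar r] := by
  rw [myBin]
  have h2 : ¬ 2 * q + r < 2 := by omega
  rw [dif_neg h2]
  have hd : (2 * q + r) / 2 = q := by omega
  have hm : (2 * q + r) % 2 = r := by omega
  rw [hd, hm]

lemma myBin_lt_two (r : Nat) (hr : r < 2) : myBin r = [Nat.digitChar r] := by
  rw [myBin, dif_pos hr]

lemma zfill_two_mul (n q r : Nat) (hn : 1 ≤ n) (hq : q < 2 ^ n) (hr : r < 2) :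
    PySem.Chars.zfill (myBin (2 * q + r)) ((n : Int) + 1)
      = PySem.Chars.zfill (myBin q) (n : Int) ++ [Nat.digitChar r] := by
  have hcast : ((n : Int) + 1) = ((n + 1 : Nat) : Int) := by push_cast; ring
  rw [hcast]
  rcases Nat.eq_zero_or_pos q with hq0 | hq1
  · subst hq0
    simp only [Nat.mul_zero, Nat.zero_add]
    rw [myBin_lt_two r hr, myBin_lt_two 0 (by omega)]
    rw [zfill_bin _ _ (by simp) (fun c hc => by simp at hc; subst hc; exact digitChar_bin r hr)]
    rw [zfill_bin _ _ (by simp) (fun c hc => by simp at hc; subst hc; exact digitChar_bin 0 (by omega))]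
    simp only [List.length_singleton]
    have hd0 : Nat.digitChar 0 = '0' := by decide
    rw [hd0, show n + 1 - 1 = n from by omega]
    conv_lhs => rw [show n = (n - 1) + 1 from by omega, List.replicate_succ']
  · rw [myBin_two_mul_add q r hq1 hr]
    have hbq := myBin_bin q
    have hb : ∀ c ∈ myBin q ++ [Nat.digitChar r], c = '0' ∨ c = '1' := by
      intro c hc
      rcases List.mem_append.mp hc with h1 | h1
      · exact hbq c h1
      · simp at h1; subst h1; exact digitChar_bin r hr
    rw [zfill_bin _ _ (by simp) hb, zfill_bin _ _ (myBin_ne_nil q) hbq]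
    simp only [List.length_append, List.length_singleton]
    have : n + 1 - ((myBin q).length + 1) = n - (myBin q).length := by omega
    rw [this, List.append_assoc]

lemma zfill_length_eq (n q : Nat) (hn : 1 ≤ n) (hq : q < 2 ^ n) :
    (PySem.Chars.zfill (myBin q) (n : Int)).length = n := by
  rw [zfill_bin _ _ (myBin_ne_nil q) (myBin_bin q)]
  have := myBin_length_le q n hn hq
  simp only [List.length_append, List.length_replicate]
  omega

lemma zip_bits (xs : List String) (y : String) (q r : Nat)
    (hq : q < 2 ^ xs.length) (hr : r < 2) :
    ((PySem.Chars.zfill (PySem.Int.toBinChars (Int.ofNat (2 * q + r)))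
        (PySem.List.len (xs ++ [y]))).zip (xs ++ [y]))
      = ((PySem.Chars.zfill (PySem.Int.toBinChars (Int.ofNat q))
          (PySem.List.len xs)).zip xs) ++ [(Nat.digitChar r, y)] := by
  rw [toBinChars_ofNat, toBinChars_ofNat]
  cases xs with
  | nil =>
    have hq0 : q = 0 := by simpa using hq
    subst hq0
    simp only [Nat.mul_zero, Nat.zero_add]
    rw [myBin_lt_two r hr]
    have hlen : PySem.List.len ([] ++ [y]) = (1 : Int) := by simp [PySem.List.len]
    rw [hlen]
    have : PySem.Chars.zfill [Nat.digitChar r] (1 : Int) = [Nat.digitChar r] := by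
      unfold PySem.Chars.zfill
      rw [if_pos (by simp)]
    rw [this]
    simp
  | cons x xs' =>
    set zs := x :: xs' with hzs
    have hn : 1 ≤ zs.length := by simp [hzs]
    have hlen1 : PySem.List.len (zs ++ [y]) = ((zs.length : Int) + 1) := by
      simp [PySem.List.len]
    have hlen2 : PySem.List.len zs = (zs.length : Int) := by simp [PySem.List.len]
    rw [hlen1, hlen2, zfill_two_mul zs.length q r hn hq hr]
    rw [List.zip_append (by rw [zfill_length_eq zs.length q hn hq])]
    simp

lemma listRange_two_mul (m : Nat) :
    List.range (2 * m) = (List.range m).flatMap (fun q => [2 * q, 2 * q + 1]) := by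
  induction m with
  | zero => simp
  | succ m ih =>
    have h : 2 * (m + 1) = (2 * m + 1) + 1 := by ring
    rw [h, List.range_succ, List.range_succ, List.range_succ, List.flatMap_append, ← ih]
    simp

lemma foldl_snoc {α β : Type} (f : α → β) (l : List α) (acc : List β) :
    List.foldl (fun r i => r ++ [f i]) acc l = acc ++ l.map f := by
  induction l generalizing acc with
  | nil => simp
  | cons x xs ih => simp [ih]

-- the common (mid-level) enumeration both programs compute (A's formatter throughout)
def eMask (normalFmt maskedFmt tailfmt : String) : List String → List (List String × List String)
  | [] => [([], [])]
  | y :: rest =>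
      (eMask normalFmt maskedFmt tailfmt rest).map (fun p => (pyMod normalFmt y :: p.1, p.2))
        ++ (eMask normalFmt maskedFmt tailfmt rest).map
            (fun p => (pyMod maskedFmt y :: p.1, pyMod tailfmt y :: p.2))

lemma goAlt_eq (nf mf tf : String)
    (hn : (convLetters nf.toList).isSome) (hm : (convLetters mf.toList).isSome)
    (ht : (convLetters tf.toList).isSome) (source : List String) :
    ∀ g t, goAlt nf mf tf source g t
      = (eMask nf mf tf source).map (fun p => (g ++ p.1, t ++ p.2)) := by
  induction source with
  | nil => intro g t; simp [goAlt, eMask]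
  | cons y rest ih =>
    intro g t
    rw [goAlt, eMask, ih, ih,
      pyMod_eq_alt nf y hn, pyMod_eq_alt mf y hm, pyMod_eq_alt tf y ht]
    simp [List.map_append, List.map_map, Function.comp_def]

lemma eMask_snoc (nf mf tf : String) (xs : List String) (y : String) :
    eMask nf mf tf (xs ++ [y])
      = (eMask nf mf tf xs).flatMap (fun p =>
          [(p.1 ++ [pyMod nf y], p.2), (p.1 ++ [pyMod mf y], p.2 ++ [pyMod tf y])]) := by
  induction xs with
  | nil => simp [eMask]
  | cons z zs ih =>
    rw [List.cons_append, eMask, ih, eMask]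
    rw [List.flatMap_append, List.flatMap_map, List.flatMap_map]
    rw [List.map_flatMap, List.map_flatMap]
    simp

lemma rowA_snoc (nf mf tf : String) (xs : List String) (y : String) (q r : Nat)
    (hq : q < 2 ^ xs.length) (hr : r < 2) :
    rowA nf mf tf (xs ++ [y]) (2 * q + r)
      = maskStep nf mf tf (rowA nf mf tf xs q) (Nat.digitChar r, y) := by
  unfold rowA
  rw [zip_bits xs y q r hq hr, List.foldl_append]
  simp

lemma rows_eq (nf mf tf : String) (source : List String) :
    (List.range (2 ^ source.length)).map (rowA nf mf tf source) = eMask nf mf tf source := by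
  induction source using List.reverseRecOn with
  | nil =>
    simp only [List.length_nil, pow_zero, List.range_one]
    simp [rowA, eMask, PySem.List.len]
  | append_singleton xs y ih =>
    have hlen : (xs ++ [y]).length = xs.length + 1 := by simp
    rw [hlen, pow_succ, Nat.mul_comm, listRange_two_mul, List.map_flatMap]
    have hstep : ∀ q ∈ List.range (2 ^ xs.length),
        List.map (rowA nf mf tf (xs ++ [y])) [2 * q, 2 * q + 1]
          = (fun p => [(p.1 ++ [pyMod nf y], p.2), (p.1 ++ [pyMod mf y], p.2 ++ [pyMod tf y])])
              (rowA nf mf tf xs q) := by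
      intro q hqmem
      have hq : q < 2 ^ xs.length := List.mem_range.mp hqmem
      have h0 := rowA_snoc nf mf tf xs y q 0 hq (by omega)
      have h1 := rowA_snoc nf mf tf xs y q 1 hq (by omega)
      simp only [Nat.add_zero] at h0
      simp only [List.map_cons, List.map_nil, h0, h1]
      simp only [maskStep]
      rw [if_pos (by decide), if_neg (by decide)]
    rw [List.flatMap_congr hstep, eMask_snoc, ← ih, List.flatMap_map]

lemma fmtOkB_some (source : List String) (f : String) (h : fmtOkB source f = true) :
    (convLetters f.toList).isSome := by
  unfold fmtOkB at h
  cases hcl : convLetters f.toList with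
  | none => rw [hcl] at h; simp at h
  | some ls => simp

-- ===== VERDICT (by name: the statement is the Claim_ definition above) =====
theorem binaryMask_spec : Claim_equal_binaryMask := by
  intro source nf mf tf _hDom hPre
  unfold Spec_binaryMask
  rcases hPre with hnil | hok
  · subst hnil
    rfl
  · simp only [Bool.and_eq_true] at hok
    have hn := fmtOkB_some source nf hok.1.1
    have hm := fmtOkB_some source mf hok.1.2
    have ht := fmtOkB_some source tf hok.2
    unfold binaryMask binaryMask_alt
    rw [foldl_snoc, List.nil_append, rows_eq, goAlt_eq nf mf tf hn hm ht]
    simp
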